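-- pv_equiv track=rewrite | github.com/Konnits/INF349-Programacion-competitiva | W01/preparing_olympiads.py | sum_groups
-- ===== SOURCE A (Python) =====
-- def sum_groups(nums, groups, l, r, x, prev = []):
--     if groups == 1:
--         ret = []
--         for i in nums:
--             harder = max(prev + [i])
--             easiest = min(prev + [i])
--             v = sum(prev + [i])
--             if l <= v and v <= r and harder - easiest >= x:
--                 ret.append(v)
--         return ret
--     else:
--
--         ret = []
--         for pos, i in enumerate(nums):
--             ret += sum_groups(nums[pos + 1 : ], groups - 1, l, r, x, prev + [i])
--         return ret
-- ===== SOURCE B (Python) =====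
-- def sum_groups(nums, groups, l, r, x, prev=[]):
--     # breadth-first layered expansion instead of recursion:
--     # each state is (remaining suffix of nums, chosen so far); after `groups`
--     # layers every state holds a complete selection, in lexicographic order.
--     if groups < 1 or groups > len(nums):
--         return []
--     states = [(nums, list(prev))]
--     for _ in range(groups):
--         new_states = []
--         for rem, chosen in states:
--             for idx in range(len(rem)):
--                 new_states.append((rem[idx + 1:], chosen + [rem[idx]]))
--         states = new_states
--     out = []
--     for _, chosen in states:
--         v = sum(chosen)
--         if l <= v <= r and max(chosen) - min(chosen) >= x:
--             out.append(v)
--     return out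
-- ===== Notes on version B (the rewrite author's own statement) =====
-- stated objective: alternative
-- what changed: Replaces A's depth-first recursion over suffixes with an iterative breadth-first layered expansion: a worklist of (remaining-suffix, chosen) states is expanded `groups` times and then filtered once, with an up-front guard returning [] when groups < 1 or groups > len(nums) (exactly the cases where A's recursion dies out to []).
import Mathlib
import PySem

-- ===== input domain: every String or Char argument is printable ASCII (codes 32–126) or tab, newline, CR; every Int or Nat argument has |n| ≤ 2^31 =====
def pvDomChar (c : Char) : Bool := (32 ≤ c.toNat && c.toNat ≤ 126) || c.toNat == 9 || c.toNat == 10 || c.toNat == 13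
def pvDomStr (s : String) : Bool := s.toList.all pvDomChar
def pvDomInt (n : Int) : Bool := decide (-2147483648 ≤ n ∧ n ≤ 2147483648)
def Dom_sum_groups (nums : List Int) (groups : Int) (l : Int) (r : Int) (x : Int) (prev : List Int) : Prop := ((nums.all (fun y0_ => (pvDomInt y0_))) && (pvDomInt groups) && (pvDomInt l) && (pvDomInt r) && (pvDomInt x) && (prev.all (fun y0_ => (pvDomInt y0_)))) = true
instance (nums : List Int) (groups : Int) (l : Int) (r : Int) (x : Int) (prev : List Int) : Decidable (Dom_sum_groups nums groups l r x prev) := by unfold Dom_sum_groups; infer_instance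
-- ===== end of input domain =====

-- B replaces A's depth-first recursion by a breadth-first layered expansion of
-- (suffix, chosen) states; objective: alternative structure, same cost, same results.

-- ===== PORT A =====
-- Literal port of A.  The `enumerate` loop `for pos, i: ret += sum_groups(nums[pos+1:], groups-1, …, prev+[i])`
-- is rendered as structural recursion: the pos = 0 term, then the identical loop over the tail
-- (same groups, same prev, which is exactly the else-branch of sum_groups on the tail).
def sum_groups (nums : List Int) (groups : Int) (l : Int) (r : Int) (x : Int) (prev : List Int) : List Int :=
  if groups = 1 then
    nums.foldl (fun ret i =>
      let harder := (PySem.List.max? (prev ++ [i]) (fun y => y)).getD 0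
      let easiest := (PySem.List.min? (prev ++ [i]) (fun y => y)).getD 0
      let v := (prev ++ [i]).sum
      if l ≤ v ∧ v ≤ r ∧ harder - easiest ≥ x then ret ++ [v] else ret) []
  else
    match nums with
    | [] => []
    | i :: rest =>
        sum_groups rest (groups - 1) l r x (prev ++ [i]) ++ sum_groups rest groups l r x prev

-- ===== PORT B =====
-- exact rendering of Source B's inner loop `for idx in range(len(rem)): (rem[idx+1:], rem[idx])`:
-- the list of (strict suffix after position idx, element at idx), in order.
def pySplits : List Int → List (List Int × Int)
  | [] => []
  | i :: rest => (rest, i) :: pySplits rest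

def sum_groups_alt (nums : List Int) (groups : Int) (l : Int) (r : Int) (x : Int) (prev : List Int) : List Int :=
  if groups < 1 ∨ groups > (nums.length : Int) then []
  else
    let states := (List.range groups.toNat).foldl
      (fun states _ =>
        states.foldl (fun ns st =>
          (pySplits st.1).foldl (fun ns p => ns ++ [(p.1, st.2 ++ [p.2])]) ns) [])
      [(nums, prev)]
    states.foldl (fun out st =>
      let v := st.2.sum
      if l ≤ v ∧ v ≤ r ∧
          (PySem.List.max? st.2 (fun y => y)).getD 0 - (PySem.List.min? st.2 (fun y => y)).getD 0 ≥ x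
      then out ++ [v] else out) []

-- ===== PRECONDITION & SPEC =====
def Spec_sum_groups (nums : List Int) (groups : Int) (l : Int) (r : Int) (x : Int) (prev : List Int) (out : List Int) : Prop := out = sum_groups_alt nums groups l r x prev
instance (nums : List Int) (groups : Int) (l : Int) (r : Int) (x : Int) (prev : List Int) (out : List Int) : Decidable (Spec_sum_groups nums groups l r x prev out) := by unfold Spec_sum_groups; infer_instance

-- ===== CLAIM (what is proved, stated in full; the proofs are below) =====
def Claim_equal_sum_groups : Prop := ∀ (nums : List Int) (groups : Int) (l : Int) (r : Int) (x : Int) (prev : List Int), Dom_sum_groups nums groups l r x prev → Spec_sum_groups nums groups l r x prev (sum_groups nums groups l r x prev)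

-- ===== LEMMAS AND PROOFS =====

-- the kept output of one completed state
def pvKeep (l r x : Int) (ch : List Int) : List Int :=
  if l ≤ ch.sum ∧ ch.sum ≤ r ∧
      (PySem.List.max? ch (fun y => y)).getD 0 - (PySem.List.min? ch (fun y => y)).getD 0 ≥ x
  then [ch.sum] else []

def pvExpand (S : List (List Int × List Int)) : List (List Int × List Int) :=
  S.flatMap (fun st => (pySplits st.1).map (fun p => (p.1, st.2 ++ [p.2])))

def pvExpandN : Nat → List (List Int × List Int) → List (List Int × List Int)
  | 0, S => S
  | n + 1, S => pvExpand (pvExpandN n S)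

def pvFin (l r x : Int) (S : List (List Int × List Int)) : List Int :=
  S.flatMap (fun st => pvKeep l r x st.2)

theorem pvSplitsFlat (h : Int → List Int) (rem : List Int) :
    (pySplits rem).flatMap (fun p => h p.2) = rem.flatMap h := by
  induction rem with
  | nil => rfl
  | cons i rest ih => simp [pySplits, ih]

theorem pvExpand_append (A B : List (List Int × List Int)) :
    pvExpand (A ++ B) = pvExpand A ++ pvExpand B := by
  simp [pvExpand]

theorem pvExpandN_append (n : Nat) (A B : List (List Int × List Int)) :
    pvExpandN n (A ++ B) = pvExpandN n A ++ pvExpandN n B := by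
  induction n generalizing A B with
  | zero => rfl
  | succ n ih => simp [pvExpandN, ih, pvExpand_append]

theorem pvExpandN_nil (n : Nat) : pvExpandN n [] = [] := by
  induction n with
  | zero => rfl
  | succ n ih => simp [pvExpandN, ih, pvExpand]

theorem pvExpandN_inner (n : Nat) (S : List (List Int × List Int)) :
    pvExpandN (n + 1) S = pvExpandN n (pvExpand S) := by
  induction n generalizing S with
  | zero => rfl
  | succ n ih => show pvExpand (pvExpandN (n+1) S) = _; rw [ih]; rfl

theorem pvFin_append (l r x : Int) (A B : List (List Int × List Int)) :
    pvFin l r x (A ++ B) = pvFin l r x A ++ pvFin l r x B := by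
  simp [pvFin]

theorem pvFinN_flat (l r x : Int) (n : Nat) (S : List (List Int × List Int)) :
    pvFin l r x (pvExpandN n S) = S.flatMap (fun st => pvFin l r x (pvExpandN n [st])) := by
  induction S with
  | nil => simp [pvExpandN_nil, pvFin]
  | cons st S' ih =>
      have : st :: S' = [st] ++ S' := rfl
      rw [this, pvExpandN_append, pvFin_append, ih]
      simp

-- the foldl in B's per-layer loop is pvExpand
theorem pvInnerFold (S : List (List Int × List Int)) (acc : List (List Int × List Int)) :
    S.foldl (fun ns st =>
      (pySplits st.1).foldl (fun ns p => ns ++ [(p.1, st.2 ++ [p.2])]) ns) acc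
    = acc ++ pvExpand S := by
  induction S generalizing acc with
  | nil => simp [pvExpand]
  | cons st S' ih =>
      have inner : ∀ (L : List (List Int × Int)) (ns : List (List Int × List Int)),
          L.foldl (fun ns p => ns ++ [(p.1, st.2 ++ [p.2])]) ns
          = ns ++ L.map (fun p => (p.1, st.2 ++ [p.2])) := by
        intro L
        induction L with
        | nil => simp
        | cons p L' ihL => intro ns; simp [ihL]
      simp only [List.foldl_cons, ih, inner, pvExpand, List.flatMap_cons]
      simp

theorem pvRangeFold (n : Nat) (S : List (List Int × List Int)) :
    (List.range n).foldl (fun states _ =>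
      states.foldl (fun ns st =>
        (pySplits st.1).foldl (fun ns p => ns ++ [(p.1, st.2 ++ [p.2])]) ns) []) S
    = pvExpandN n S := by
  induction n with
  | zero => rfl
  | succ n ih =>
      rw [List.range_succ, List.foldl_append, ih]
      show _ = pvExpand (pvExpandN n S)
      simpa using pvInnerFold (pvExpandN n S) []

theorem pvFinFold (l r x : Int) (S : List (List Int × List Int)) (acc : List Int) :
    S.foldl (fun out st =>
      let v := st.2.sum
      if l ≤ v ∧ v ≤ r ∧
          (PySem.List.max? st.2 (fun y => y)).getD 0 - (PySem.List.min? st.2 (fun y => y)).getD 0 ≥ x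
      then out ++ [v] else out) acc
    = acc ++ pvFin l r x S := by
  induction S generalizing acc with
  | nil => simp [pvFin]
  | cons st S' ih =>
      simp only [List.foldl_cons, ih, pvFin, List.flatMap_cons, pvKeep]
      split_ifs <;> simp

-- A's base case as a flatMap
theorem pvBaseFold (l r x : Int) (prev : List Int) (nums : List Int) (acc : List Int) :
    nums.foldl (fun ret i =>
      let harder := (PySem.List.max? (prev ++ [i]) (fun y => y)).getD 0
      let easiest := (PySem.List.min? (prev ++ [i]) (fun y => y)).getD 0
      let v := (prev ++ [i]).sum
      if l ≤ v ∧ v ≤ r ∧ harder - easiest ≥ x then ret ++ [v] else ret) acc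
    = acc ++ nums.flatMap (fun i => pvKeep l r x (prev ++ [i])) := by
  induction nums generalizing acc with
  | nil => simp
  | cons i rest ih =>
      simp only [List.foldl_cons, ih, List.flatMap_cons, pvKeep]
      split_ifs <;> simp

-- A's else branch as a flatMap over pySplits
theorem pvElseFlat (l r x G : Int) (hG : G ≠ 1) (rem prev : List Int) :
    sum_groups rem G l r x prev
    = (pySplits rem).flatMap (fun p => sum_groups p.1 (G - 1) l r x (prev ++ [p.2])) := by
  induction rem generalizing prev with
  | nil => simp [sum_groups, hG, pySplits]
  | cons i rest ih =>
      rw [show sum_groups (i :: rest) G l r x prev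
            = sum_groups rest (G - 1) l r x (prev ++ [i]) ++ sum_groups rest G l r x prev by
          simp [sum_groups, hG]]
      simp [pySplits, ih]

-- A returns [] when groups ≤ 0
theorem pvA_nonpos (l r x G : Int) (hG : G ≤ 0) (nums prev : List Int) :
    sum_groups nums G l r x prev = [] := by
  induction nums generalizing G prev with
  | nil => simp [sum_groups, show G ≠ 1 by omega]
  | cons i rest ih =>
      rw [show sum_groups (i :: rest) G l r x prev
            = sum_groups rest (G - 1) l r x (prev ++ [i]) ++ sum_groups rest G l r x prev by
          simp [sum_groups, show G ≠ 1 by omega]]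
      rw [ih (G - 1) (by omega), ih G hG]
      rfl

-- A returns [] when groups exceeds the number of available elements
theorem pvA_toolong (l r x G : Int) (nums prev : List Int)
    (h : G > (nums.length : Int)) : sum_groups nums G l r x prev = [] := by
  induction nums generalizing G prev with
  | nil =>
      by_cases h1 : G = 1
      · simp [sum_groups, h1]
      · simp [sum_groups, h1]
  | cons i rest ih =>
      have hG : G ≠ 1 := by simp at h; omega
      rw [show sum_groups (i :: rest) G l r x prev
            = sum_groups rest (G - 1) l r x (prev ++ [i]) ++ sum_groups rest G l r x prev by
          simp [sum_groups, hG]]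
      have h' : (rest.length : Int) < G - 1 := by simp at h; omega
      rw [ih (G - 1) (prev ++ [i]) (by omega), ih G prev (by simp at h ⊢; omega)]
      rfl

-- the key correspondence: g layers of expansion, then filtering, is A
theorem pvKey (l r x : Int) (g : Nat) (hg : 1 ≤ g) (rem prev : List Int) :
    pvFin l r x (pvExpandN g [(rem, prev)]) = sum_groups rem (g : Int) l r x prev := by
  induction g generalizing rem prev with
  | zero => omega
  | succ g ih =>
      by_cases hg1 : g = 0
      · subst hg1
        show pvFin l r x (pvExpand [(rem, prev)]) = _
        simp only [Nat.zero_add, Nat.cast_one]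
        rw [sum_groups.eq_def, if_pos rfl]
        rw [pvBaseFold l r x prev rem [], List.nil_append]
        simp only [pvExpand, pvFin, List.flatMap_cons, List.flatMap_nil, List.append_nil,
          List.flatMap_map]
        exact pvSplitsFlat (fun i => pvKeep l r x (prev ++ [i])) rem
      · have hg' : 1 ≤ g := by omega
        rw [pvExpandN_inner, pvFinN_flat]
        have hC : pvExpand [(rem, prev)]
            = (pySplits rem).map (fun p => (p.1, prev ++ [p.2])) := by
          simp [pvExpand]
        rw [hC, List.flatMap_map]
        have hGne : ((g : Int) + 1) ≠ 1 := by omega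
        rw [show ((g + 1 : Nat) : Int) = (g : Int) + 1 by push_cast; ring]
        rw [pvElseFlat l r x ((g : Int) + 1) hGne rem prev]
        simp only [add_sub_cancel_right]
        congr 1
        funext p
        exact ih hg' p.1 (prev ++ [p.2])

-- ===== VERDICT (by name: the statement is the Claim_ definition above) =====
theorem sum_groups_spec : Claim_equal_sum_groups := by
  intro nums groups l r x prev _
  unfold Spec_sum_groups sum_groups_alt
  by_cases h : groups < 1 ∨ groups > (nums.length : Int)
  · rw [if_pos h]
    rcases h with h | h
    · exact pvA_nonpos l r x groups (by omega) nums prev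
    · exact pvA_toolong l r x groups nums prev h
  · rw [if_neg h]
    push Not at h
    obtain ⟨h1, h2⟩ := h
    show sum_groups nums groups l r x prev
        = ((List.range groups.toNat).foldl _ [(nums, prev)]).foldl _ []
    rw [pvRangeFold, pvFinFold]
    rw [List.nil_append]
    have hcast : ((groups.toNat : Nat) : Int) = groups := by omega
    rw [pvKey l r x groups.toNat (by omega) nums prev, hcast]
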